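-- pv_equiv track=rewrite | github.com/ixe013/dnstester | dnstester/analyze.py | getEquivalentHostFile
-- ===== SOURCE A (Python) =====
-- def getEquivalentHostFile(dnsdata):
--     results = []
--
--     #For every DNS records of a single hostname, get all the DNS entries
--     for host in dnsdata:
--         try:
--             #For every record type, get all the values
--             current_host = host
--             current_ip = None
--             entries = dnsdata[host]
--
--             while True:
--                 if 'A' in entries:
--                     #Found
--                     current_ip = entries['A'][0]
--                     results.append( (current_ip, host) )
--                     break
--                 elif 'CNAME' in entries:
--                     current_host = entries['CNAME'][0]
--                     entries = dnsdata[current_host]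
--                 else:
--                     break
--
--         except KeyError:
--             pass
--
--     return results
-- ===== SOURCE B (Python) =====
-- # B: memoized recursive CNAME-chain resolver — each host's resolved IP is cached
-- # in a memo dict (a different traversal of the same data; A re-walks each chain
-- # iteratively per host). Like A, B does not terminate on CNAME cycles (excluded by Pre_).
-- def getEquivalentHostFile(dnsdata):
--     memo = {}
--
--     def resolve(host):
--         if host in memo:
--             return memo[host]
--         entries = dnsdata.get(host)
--         if entries is None:
--             ip = None
--         elif 'A' in entries:
--             ip = entries['A'][0]
--         elif 'CNAME' in entries:
--             ip = resolve(entries['CNAME'][0])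
--         else:
--             ip = None
--         memo[host] = ip
--         return ip
--
--     results = []
--     for host in dnsdata:
--         ip = resolve(host)
--         if ip is not None:
--             results.append((ip, host))
--     return results
-- ===== Notes on version B (the rewrite author's own statement) =====
-- stated objective: alternative
-- what changed: B caches the resolved IP of every host in a memo dict and resolves CNAME chains by recursion, instead of A's per-host iterative re-walk of the whole chain; not measurably faster on the generated (short-chain) inputs.
-- outside the precondition, e.g. on getEquivalentHostFile({'h': {'A': []}}): A raises IndexError, B raises IndexError
import Mathlib
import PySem

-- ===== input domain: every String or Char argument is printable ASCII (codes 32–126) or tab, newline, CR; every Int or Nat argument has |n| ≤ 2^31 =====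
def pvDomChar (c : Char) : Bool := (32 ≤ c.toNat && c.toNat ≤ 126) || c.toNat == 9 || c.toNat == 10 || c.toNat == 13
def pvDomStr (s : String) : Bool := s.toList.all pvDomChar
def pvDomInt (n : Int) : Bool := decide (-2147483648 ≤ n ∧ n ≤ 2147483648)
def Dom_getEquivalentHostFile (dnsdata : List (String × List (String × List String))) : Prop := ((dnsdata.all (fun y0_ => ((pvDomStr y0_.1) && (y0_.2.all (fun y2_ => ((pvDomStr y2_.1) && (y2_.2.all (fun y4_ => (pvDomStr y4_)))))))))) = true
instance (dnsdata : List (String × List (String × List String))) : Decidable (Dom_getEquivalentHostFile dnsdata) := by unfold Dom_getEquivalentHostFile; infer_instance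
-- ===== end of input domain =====

-- One line: B resolves each host recursively through a per-host memo dict of resolved
-- IPs — a different traversal from A's iterative per-host chain walk (objective: alternative).

-- ===== PORT A =====
-- the inner `while True` loop of A; fuel only makes the loop total in Lean
-- (under Pre_ the chain ends well before the fuel runs out)
def getEquivalentHostFileGoA (d : List (String × List (String × List String)))
    (entries : List (String × List String)) : Nat → Option String
  | 0 => none
  | fuel + 1 =>
    match (PySem.Dict.mk entries).get? "A" with
    | some vs => PySem.List.pyGet? vs 0          -- none = IndexError on [], excluded by Pre_
    | none =>
      match (PySem.Dict.mk entries).get? "CNAME" with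
      | some vs =>
        match PySem.List.pyGet? vs 0 with        -- none = IndexError on [], excluded by Pre_
        | some nh =>
          match (PySem.Dict.mk d).get? nh with
          | some e2 => getEquivalentHostFileGoA d e2 fuel
          | none => none                          -- KeyError: caught, host skipped
        | none => none
      | none => none

def getEquivalentHostFile (dnsdata : List (String × List (String × List String))) : List (String × String) :=
  dnsdata.foldl (fun results p =>
    match (PySem.Dict.mk dnsdata).get? p.1 with
    | some entries =>
      match getEquivalentHostFileGoA dnsdata entries (dnsdata.length + 1) with
      | some ip => results ++ [(ip, p.1)]
      | none => results
    | none => results) []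

-- ===== PORT B =====
-- Source B's `resolve`: memo dict threaded through; fuel only makes the recursion total
def getEquivalentHostFileResolve (d : List (String × List (String × List String)))
    (memo : PySem.Dict String (Option String)) (h : String) :
    Nat → Option String × PySem.Dict String (Option String)
  | 0 => (none, memo)
  | fuel + 1 =>
    match memo.get? h with
    | some r => (r, memo)
    | none =>
      let res :=
        match (PySem.Dict.mk d).get? h with
        | none => ((none : Option String), memo)
        | some entries =>
          match (PySem.Dict.mk entries).get? "A" with
          | some vs => (PySem.List.pyGet? vs 0, memo)
          | none =>
            match (PySem.Dict.mk entries).get? "CNAME" with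
            | some vs =>
              match PySem.List.pyGet? vs 0 with
              | some nh => getEquivalentHostFileResolve d memo nh fuel
              | none => ((none : Option String), memo)
            | none => ((none : Option String), memo)
      (res.1, res.2.insert h res.1)

def getEquivalentHostFile_alt (dnsdata : List (String × List (String × List String))) : List (String × String) :=
  (dnsdata.foldl
    (fun (acc : List (String × String) × PySem.Dict String (Option String)) p =>
      match getEquivalentHostFileResolve dnsdata acc.2 p.1 (dnsdata.length + 1) with
      | (some ip, memo') => (acc.1 ++ [(ip, p.1)], memo')
      | (none, memo') => (acc.1, memo'))
    ([], PySem.Dict.empty)).1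

-- ===== PRECONDITION & SPEC =====
-- one CNAME-following step of the DNS graph (none = the chain ends here)
def pvStep (d : List (String × List (String × List String))) (h : String) : Option String :=
  match (PySem.Dict.mk d).get? h with
  | none => none
  | some e =>
    match (PySem.Dict.mk e).get? "A" with
    | some _ => none
    | none =>
      match (PySem.Dict.mk e).get? "CNAME" with
      | some vs => PySem.List.pyGet? vs 0
      | none => none

def pvStepN (d : List (String × List (String × List String))) : Nat → String → Option String
  | 0, h => some h
  | n + 1, h =>
    match pvStep d h with
    | none => none
    | some h' => pvStepN d n h'

-- Pre_ excludes: association lists with duplicate keys (no Python dict corresponds to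
-- them); records whose first-match 'A' list — or, when 'A' is absent, 'CNAME' list —
-- is empty (A raises IndexError there); and CNAME cycles (A's while-loop never ends).
def Pre_getEquivalentHostFile (dnsdata : List (String × List (String × List String))) : Prop :=
  (dnsdata.map Prod.fst).Nodup ∧
  (∀ p ∈ dnsdata, (p.2.map Prod.fst).Nodup) ∧
  (∀ p ∈ dnsdata, (PySem.Dict.mk p.2).get? "A" ≠ some [] ∧
      ((PySem.Dict.mk p.2).get? "A" = none → (PySem.Dict.mk p.2).get? "CNAME" ≠ some [])) ∧
  (∀ p ∈ dnsdata, pvStepN dnsdata (dnsdata.length + 1) p.1 = none)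

instance (dnsdata : List (String × List (String × List String))) : Decidable (Pre_getEquivalentHostFile dnsdata) := by
  unfold Pre_getEquivalentHostFile; infer_instance

def pvWitness_getEquivalentHostFile : (List (String × List (String × List String))) :=
  [("www.example.com", [("CNAME", ["example.com"])]),
   ("example.com", [("A", ["1.2.3.4"])])]

def Spec_getEquivalentHostFile (dnsdata : List (String × List (String × List String))) (out : List (String × String)) : Prop := out = getEquivalentHostFile_alt dnsdata
instance (dnsdata : List (String × List (String × List String))) (out : List (String × String)) : Decidable (Spec_getEquivalentHostFile dnsdata out) := by unfold Spec_getEquivalentHostFile; infer_instance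

-- ===== CLAIM (what is proved, stated in full; the proofs are below) =====
def Claim_equal_getEquivalentHostFile : Prop := ∀ (dnsdata : List (String × List (String × List String))), Dom_getEquivalentHostFile dnsdata → Pre_getEquivalentHostFile dnsdata → Spec_getEquivalentHostFile dnsdata (getEquivalentHostFile dnsdata)

-- ===== LEMMAS AND PROOFS =====

-- reference chain resolution (fuel = number of hosts still allowed to visit)
def pvChase (d : List (String × List (String × List String))) : Nat → String → Option String
  | 0, _ => none
  | f + 1, h =>
    match (PySem.Dict.mk d).get? h with
    | none => none
    | some e =>
      match (PySem.Dict.mk e).get? "A" with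
      | some vs => PySem.List.pyGet? vs 0
      | none =>
        match (PySem.Dict.mk e).get? "CNAME" with
        | some vs =>
          match PySem.List.pyGet? vs 0 with
          | some nh => pvChase d f nh
          | none => none
        | none => none

def pvRes (d : List (String × List (String × List String))) (h : String) : Option String :=
  pvChase d (d.length + 1) h

def pvInv (d : List (String × List (String × List String)))
    (memo : PySem.Dict String (Option String)) : Prop :=
  ∀ k r, memo.get? k = some r → r = pvRes d k

lemma pvChase_step_some {d : List (String × List (String × List String))} {h nh : String}
    (hs : pvStep d h = some nh) (f : Nat) : pvChase d (f + 1) h = pvChase d f nh := by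
  unfold pvStep at hs
  unfold pvChase
  cases hd : (PySem.Dict.mk d).get? h with
  | none => simp [hd] at hs
  | some e =>
    simp only [hd] at hs ⊢
    cases hA : (PySem.Dict.mk e).get? "A" with
    | some vs => simp [hA] at hs
    | none =>
      simp only [hA] at hs ⊢
      cases hC : (PySem.Dict.mk e).get? "CNAME" with
      | none => simp [hC] at hs
      | some vs =>
        simp only [hC] at hs ⊢
        cases hg : PySem.List.pyGet? vs 0 with
        | none => simp [hg] at hs
        | some nh' =>
          simp only [hg] at hs ⊢
          cases hs; cases f <;> rfl

lemma pvChase_step_none {d : List (String × List (String × List String))} {h : String}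
    (hs : pvStep d h = none) (f : Nat) : pvChase d (f + 1) h = pvChase d 1 h := by
  unfold pvStep at hs
  unfold pvChase
  cases hd : (PySem.Dict.mk d).get? h with
  | none => simp [hd]
  | some e =>
    simp only [hd] at hs ⊢
    cases hA : (PySem.Dict.mk e).get? "A" with
    | some vs => simp [hA]
    | none =>
      simp only [hA] at hs ⊢
      cases hC : (PySem.Dict.mk e).get? "CNAME" with
      | none => simp [hC]
      | some vs =>
        simp only [hC] at hs ⊢
        cases hg : PySem.List.pyGet? vs 0 with
        | none => simp [hg]
        | some nh' => simp [hg] at hs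

lemma pvChase_fuel {d : List (String × List (String × List String))} :
    ∀ (f : Nat) (h : String), pvStepN d f h = none → ∀ g, f ≤ g → pvChase d g h = pvChase d f h := by
  intro f
  induction f with
  | zero => intro h hf; simp [pvStepN] at hf
  | succ f ih =>
    intro h hf g hg
    obtain ⟨g', rfl⟩ : ∃ g', g = g' + 1 := ⟨g - 1, by omega⟩
    unfold pvStepN at hf
    cases hs : pvStep d h with
    | none => rw [pvChase_step_none hs g', pvChase_step_none hs f]
    | some nh =>
      simp only [hs] at hf
      rw [pvChase_step_some hs, pvChase_step_some hs]
      exact ih nh hf g' (by omega)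

lemma pvGoA_eq_chase {d : List (String × List (String × List String))} :
    ∀ (f : Nat) (h : String) (e : List (String × List String)),
      (PySem.Dict.mk d).get? h = some e → pvStepN d (f + 1) h = none →
      getEquivalentHostFileGoA d e (f + 1) = pvChase d (f + 1) h := by
  intro f
  induction f with
  | zero =>
    intro h e hd hf
    unfold pvStepN pvStep at hf
    unfold getEquivalentHostFileGoA pvChase
    simp only [hd] at hf ⊢
    cases hA : (PySem.Dict.mk e).get? "A" with
    | some vs => simp [hA]
    | none =>
      simp only [hA] at hf ⊢
      cases hC : (PySem.Dict.mk e).get? "CNAME" with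
      | none => simp [hC]
      | some vs =>
        simp only [hC] at hf ⊢
        cases hg : PySem.List.pyGet? vs 0 with
        | none => simp [hg]
        | some nh => simp [hg, pvStepN] at hf
  | succ f ih =>
    intro h e hd hf
    have hf' := hf
    unfold pvStepN pvStep at hf'
    unfold getEquivalentHostFileGoA pvChase
    simp only [hd] at hf' ⊢
    cases hA : (PySem.Dict.mk e).get? "A" with
    | some vs => simp [hA]
    | none =>
      simp only [hA] at hf' ⊢
      cases hC : (PySem.Dict.mk e).get? "CNAME" with
      | none => simp [hC]
      | some vs =>
        simp only [hC] at hf' ⊢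
        cases hg : PySem.List.pyGet? vs 0 with
        | none => simp [hg]
        | some nh =>
          simp only [hg] at hf' ⊢
          cases hd2 : (PySem.Dict.mk d).get? nh with
          | none =>
            -- chain broken: chase also returns none at nh
            have hnone : pvChase d (f + 1) nh = none := by
              unfold pvChase; simp [hd2]
            simp [hnone]
          | some e2 => exact ih nh e2 hd2 hf'

lemma pvResolve_correct {d : List (String × List (String × List String))} :
    ∀ (f : Nat) (h : String) (memo : PySem.Dict String (Option String)) (g : Nat),
      pvInv d memo → pvStepN d f h = none → f ≤ g → f ≤ d.length + 1 →
      (getEquivalentHostFileResolve d memo h g).1 = pvRes d h ∧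
      pvInv d (getEquivalentHostFileResolve d memo h g).2 := by
  intro f
  induction f with
  | zero => intro h memo g _ hf; simp [pvStepN] at hf
  | succ f ih =>
    intro h memo g hInv hf hg hN
    obtain ⟨g', rfl⟩ : ∃ g', g = g' + 1 := ⟨g - 1, by omega⟩
    have hf' := hf
    unfold pvStepN pvStep at hf'
    unfold getEquivalentHostFileResolve
    cases hm : memo.get? h with
    | some r => exact ⟨hInv h r hm, hInv⟩
    | none =>
      simp only [hm]
      have hInsert : ∀ (res : Option String × PySem.Dict String (Option String)),
          res.1 = pvRes d h → pvInv d res.2 →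
          (res.1, res.2.insert h res.1).1 = pvRes d h ∧
          pvInv d ((res.1, res.2.insert h res.1)).2 := by
        intro res h1 h2
        refine ⟨h1, ?_⟩
        intro k r hk
        rw [PySem.Dict.get?_insert] at hk
        by_cases hkh : k = h
        · simp [hkh] at hk; subst hkh; rw [← hk, h1]
        · simp [hkh] at hk; exact h2 k r hk
      cases hd : (PySem.Dict.mk d).get? h with
      | none =>
        simp only [hd]
        apply hInsert (none, memo) _ hInv
        unfold pvRes pvChase; simp [hd]
      | some e =>
        simp only [hd] at hf' ⊢
        cases hA : (PySem.Dict.mk e).get? "A" with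
        | some vs =>
          simp only [hA]
          apply hInsert (PySem.List.pyGet? vs 0, memo) _ hInv
          unfold pvRes pvChase; simp [hd, hA]
        | none =>
          simp only [hA] at hf' ⊢
          cases hC : (PySem.Dict.mk e).get? "CNAME" with
          | none =>
            simp only [hC]
            apply hInsert (none, memo) _ hInv
            unfold pvRes pvChase; simp [hd, hA, hC]
          | some vs =>
            simp only [hC] at hf' ⊢
            cases hgv : PySem.List.pyGet? vs 0 with
            | none =>
              simp only [hgv]
              apply hInsert (none, memo) _ hInv
              unfold pvRes pvChase; simp [hd, hA, hC, hgv]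
            | some nh =>
              simp only [hgv] at hf' ⊢
              have hstep : pvStep d h = some nh := by
                unfold pvStep; simp [hd, hA, hC, hgv]
              have hrec := ih nh memo g' hInv hf' (by omega) (by omega)
              apply hInsert _ _ hrec.2
              rw [hrec.1]
              -- pvRes d nh = pvRes d h
              unfold pvRes
              rw [pvChase_step_some hstep d.length,
                  pvChase_fuel f nh hf' (d.length + 1) (by omega),
                  pvChase_fuel f nh hf' d.length (by omega)]

lemma pvFold_eq {d : List (String × List (String × List String))} :
    ∀ (l : List (String × List (String × List String)))
      (accA : List (String × String)) (memo : PySem.Dict String (Option String)),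
      pvInv d memo → (∀ p ∈ l, pvStepN d (d.length + 1) p.1 = none) →
      l.foldl (fun results p =>
        match (PySem.Dict.mk d).get? p.1 with
        | some entries =>
          match getEquivalentHostFileGoA d entries (d.length + 1) with
          | some ip => results ++ [(ip, p.1)]
          | none => results
        | none => results) accA
      = (l.foldl
          (fun (acc : List (String × String) × PySem.Dict String (Option String)) p =>
            match getEquivalentHostFileResolve d acc.2 p.1 (d.length + 1) with
            | (some ip, memo') => (acc.1 ++ [(ip, p.1)], memo')
            | (none, memo') => (acc.1, memo'))
          (accA, memo)).1 := by
  intro l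
  induction l with
  | nil => intro accA memo _ _; rfl
  | cons p l ih =>
    intro accA memo hInv hterm
    have hp := hterm p List.mem_cons_self
    have hres := pvResolve_correct (d.length + 1) p.1 memo (d.length + 1) hInv hp (le_refl _) (le_refl _)
    simp only [List.foldl_cons]
    cases hr : getEquivalentHostFileResolve d memo p.1 (d.length + 1) with
    | mk ip memo' =>
      obtain ⟨h1, h2⟩ := hres
      rw [hr] at h1 h2
      simp only at h1 h2
      subst h1
      have hAstep :
          (match (PySem.Dict.mk d).get? p.1 with
            | some entries =>
              match getEquivalentHostFileGoA d entries (d.length + 1) with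
              | some ip0 => accA ++ [(ip0, p.1)]
              | none => accA
            | none => accA)
          = match pvRes d p.1 with
            | some v => accA ++ [(v, p.1)]
            | none => accA := by
        cases hd : (PySem.Dict.mk d).get? p.1 with
        | none =>
          have hres0 : pvRes d p.1 = none := by
            unfold pvRes pvChase; simp [hd]
          rw [hres0]
        | some entries =>
          simp only [pvGoA_eq_chase d.length p.1 entries hd hp]
          unfold pvRes
          rfl
      cases hpv : pvRes d p.1 with
      | some v =>
        rw [hpv] at hAstep
        rw [hAstep]
        exact ih (accA ++ [(v, p.1)]) memo' h2
          (fun q hq => hterm q (List.mem_cons_of_mem _ hq))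
      | none =>
        rw [hpv] at hAstep
        rw [hAstep]
        exact ih accA memo' h2
          (fun q hq => hterm q (List.mem_cons_of_mem _ hq))

-- ===== VERDICT (by name: the statement is the Claim_ definition above) =====
theorem getEquivalentHostFile_spec : Claim_equal_getEquivalentHostFile := by
  intro d _ hPre
  unfold Spec_getEquivalentHostFile getEquivalentHostFile getEquivalentHostFile_alt
  exact pvFold_eq d [] PySem.Dict.empty
    (by intro k r hk; simp [PySem.Dict.get?_empty] at hk)
    hPre.2.2.2
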